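-- pv_equiv track=rewrite | github.com/ruchirK/python-differential | differential-collection.py | collection_distinct
-- ===== SOURCE A (Python) =====
-- from collections import defaultdict
--
-- def collection_consolidate(a):
--     consolidated = defaultdict(int)
--     for (data, diff) in a:
--         consolidated[data] += diff
--     return [(data, diff) for (data, diff) in consolidated.items() if diff != 0]
--
-- def collection_reduce(a, f):
--     keys = defaultdict(list)
--     out = []
--     for ((key, val), diff) in a:
--         keys[key].append((val, diff))
--     for (key, vals) in keys.items():
--         results = f(vals)
--         for (val, diff) in results:
--             out.append(((key, val), diff))
--     return collection_consolidate(out)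
--
-- def collection_distinct(a):
--     def distinct(vals):
--         v = set()
--         for (val, diff) in vals:
--             assert(diff > 0)
--             v.add(val)
--
--         out = [(val, 1) for val in v]
--         return out
--     return collection_reduce(a, distinct)
-- ===== SOURCE B (Python) =====
-- def collection_distinct(a):
--     # single pass: group the distinct values per key, then emit ((key, val), 1)
--     keys = {}
--     for ((key, val), diff) in a:
--         assert diff > 0
--         keys.setdefault(key, set()).add(val)
--     return [((key, val), 1) for (key, vals) in keys.items() for val in vals]
-- ===== Notes on version B (the rewrite author's own statement) =====
-- stated objective: simpler
-- what changed: One fused pass builds a dict key->set of values directly (no generic reduce/consolidate machinery, no per-key (val,diff) lists, no second consolidation dict), then a single comprehension emits ((key,val),1).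
import Mathlib
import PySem

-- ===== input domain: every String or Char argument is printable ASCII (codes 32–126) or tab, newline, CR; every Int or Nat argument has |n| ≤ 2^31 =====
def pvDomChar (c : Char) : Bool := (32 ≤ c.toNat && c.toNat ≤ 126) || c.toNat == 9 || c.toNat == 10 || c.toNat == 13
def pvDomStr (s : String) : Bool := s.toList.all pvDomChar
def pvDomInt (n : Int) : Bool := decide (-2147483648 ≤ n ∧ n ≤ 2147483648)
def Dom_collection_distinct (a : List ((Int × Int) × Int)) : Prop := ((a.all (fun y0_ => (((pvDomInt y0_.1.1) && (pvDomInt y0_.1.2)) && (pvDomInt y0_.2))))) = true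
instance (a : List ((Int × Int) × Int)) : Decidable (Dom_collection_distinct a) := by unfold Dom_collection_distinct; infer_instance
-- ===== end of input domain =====

-- B fuses A's generic reduce/consolidate pipeline into one grouping pass (dict key -> set of
-- values) plus a single comprehension; objective: simpler.

-- ===== PORT A =====
-- collection_consolidate
def pyConsolidate (a : List ((Int × Int) × Int)) : List ((Int × Int) × Int) :=
  let consolidated := a.foldl (fun d (p : (Int × Int) × Int) => d.modify p.1 0 (· + p.2)) PySem.Dict.empty
  consolidated.items.filter (fun p => p.2 ≠ 0)

-- collection_reduce
def pyReduce (a : List ((Int × Int) × Int)) (f : List (Int × Int) → List (Int × Int)) :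
    List ((Int × Int) × Int) :=
  let keys := a.foldl (fun d (p : (Int × Int) × Int) => d.modify p.1.1 [] (· ++ [(p.1.2, p.2)])) PySem.Dict.empty
  let out := keys.items.foldl (fun out kv => out ++ (f kv.2).map (fun vd => ((kv.1, vd.1), vd.2))) []
  pyConsolidate out

-- the local 'distinct(vals)': collect the values into a set, emit (val, 1).
-- Its 'assert diff > 0' raise is excluded by Pre_collection_distinct.
def pyDistinctVals (vals : List (Int × Int)) : List (Int × Int) :=
  let v := vals.foldl (fun s (vd : Int × Int) => PySem.Set.add s vd.1) PySem.Set.empty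
  v.map (fun val => (val, 1))

def collection_distinct (a : List ((Int × Int) × Int)) : List ((Int × Int) × Int) :=
  pyReduce a pyDistinctVals

-- ===== PORT B =====
def collection_distinct_alt (a : List ((Int × Int) × Int)) : List ((Int × Int) × Int) :=
  let keys := a.foldl
    (fun d (p : (Int × Int) × Int) => d.modify p.1.1 PySem.Set.empty (fun s => PySem.Set.add s p.1.2))
    PySem.Dict.empty
  keys.items.flatMap (fun kv => kv.2.map (fun val => ((kv.1, val), (1 : Int))))

-- ===== PRECONDITION & SPEC =====
-- Pre_: every diff must be positive — on any item with diff ≤ 0 Python A's 'assert diff > 0'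
-- raises AssertionError (B asserts the same), so those inputs are excluded.
def Pre_collection_distinct (a : List ((Int × Int) × Int)) : Prop :=
  ∀ p ∈ a, 0 < p.2
instance (a : List ((Int × Int) × Int)) : Decidable (Pre_collection_distinct a) := by
  unfold Pre_collection_distinct; infer_instance

def pvWitness_collection_distinct : (List ((Int × Int) × Int)) :=
  [((1, 2), 1), ((1, 2), 2), ((1, 3), 1), ((4, 2), 1)]

def Spec_collection_distinct (a : List ((Int × Int) × Int)) (out : List ((Int × Int) × Int)) : Prop := out = collection_distinct_alt a
instance (a : List ((Int × Int) × Int)) (out : List ((Int × Int) × Int)) : Decidable (Spec_collection_distinct a out) := by unfold Spec_collection_distinct; infer_instance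

-- ===== CLAIM (what is proved, stated in full; the proofs are below) =====
def Claim_equal_collection_distinct : Prop := ∀ (a : List ((Int × Int) × Int)), Dom_collection_distinct a → Pre_collection_distinct a → Spec_collection_distinct a (collection_distinct a)

-- ===== LEMMAS AND PROOFS =====

-- A's consolidate over a list whose data keys are fresh and distinct just rebuilds the list
theorem consolidate_fresh (xs : List ((Int × Int) × Int)) (d : PySem.Dict (Int × Int) Int)
    (hnd : d.keys.Nodup) (hfresh : ∀ p ∈ xs, d.contains p.1 = false)
    (hx : (xs.map (·.1)).Nodup) :
    (xs.foldl (fun d (p : (Int × Int) × Int) => d.modify p.1 0 (· + p.2)) d).items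
      = d.items ++ xs := by
  induction xs generalizing d with
  | nil => simp
  | cons p xs ih =>
    have hp : d.contains p.1 = false := hfresh p (List.mem_cons_self ..)
    have hmod : d.modify p.1 0 (· + p.2) = d.insert p.1 p.2 := by
      show d.insert p.1 (d.getD p.1 0 + p.2) = _
      rw [PySem.Dict.getD_of_not_contains _ _ hp, zero_add]
    have hpx : p.1 ∉ xs.map (·.1) := (List.nodup_cons.mp hx).1
    rw [List.foldl_cons, hmod, ih]
    · rw [PySem.Dict.items_insert_of_not_contains _ _ hp]
      simp
    · exact PySem.Dict.nodup_keys_insert _ _ _ hnd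
    · intro q hq
      rw [PySem.Dict.contains_insert]
      have hne : q.1 ≠ p.1 := fun h => hpx (h ▸ List.mem_map_of_mem hq)
      simp [hne, hfresh q (List.mem_cons_of_mem _ hq)]
    · exact (List.nodup_cons.mp hx).2

-- pairs (k, v) with k from a Nodup list and v from a Nodup list per k are Nodup
theorem nodup_tagged (K : List Int) (S : Int → List Int) (hK : K.Nodup) (hS : ∀ k, (S k).Nodup) :
    (K.flatMap (fun k => (S k).map (fun v => ((k, v) : Int × Int)))).Nodup := by
  induction K with
  | nil => simp
  | cons k K ih =>
    rw [List.flatMap_cons]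
    apply List.Nodup.append
    · refine (hS k).map ?_
      intro a b h
      simpa using congrArg Prod.snd h
    · exact ih (List.nodup_cons.mp hK).2
    · intro x hx hx'
      simp only [List.mem_map] at hx
      obtain ⟨v, _, rfl⟩ := hx
      simp only [List.mem_flatMap, List.mem_map] at hx'
      obtain ⟨k', hk', v', _, h⟩ := hx'
      have : k = k' := by simpa using congrArg Prod.fst h.symm
      exact (List.nodup_cons.mp hK).1 (this ▸ hk')

-- getD of B's grouping loop: the set of values seen at key c, in first-occurrence order
theorem getD_foldl_modify_add (a : List ((Int × Int) × Int)) (d : PySem.Dict Int (PySem.Set Int)) (c : Int) :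
    (a.foldl (fun d (p : (Int × Int) × Int) => d.modify p.1.1 PySem.Set.empty (fun s => PySem.Set.add s p.1.2)) d).getD c PySem.Set.empty
      = PySem.Set.update (d.getD c PySem.Set.empty) ((a.filter (fun p => p.1.1 == c)).map (·.1.2)) := by
  induction a generalizing d with
  | nil => simp [PySem.Set.update]
  | cons p a ih =>
    simp only [List.foldl_cons, ih, List.filter_cons]
    rw [PySem.Dict.getD_modify]
    by_cases h : c = p.1.1
    · simp [h, PySem.Set.update]
    · have : (p.1.1 == c) = false := by simp [Ne.symm h]
      simp [h, this]

-- A's grouping dict as an explicit items list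
theorem itemsA (a : List ((Int × Int) × Int)) :
    (a.foldl (fun d (p : (Int × Int) × Int) => d.modify p.1.1 [] (· ++ [(p.1.2, p.2)])) PySem.Dict.empty).items
      = (PySem.Set.ofList (a.map (fun p => p.1.1))).map
          (fun k => (k, (a.filter (fun p => p.1.1 == k)).map (fun p => (p.1.2, p.2)))) := by
  have hkeys := PySem.Dict.keys_foldl_modify_key a (fun p => p.1.1) ([] : List (Int × Int))
      (fun _ p => (· ++ [(p.1.2, p.2)])) PySem.Dict.empty
  have hnd := PySem.Dict.nodup_keys_foldl_modify_key a (fun p => p.1.1) ([] : List (Int × Int))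
      (fun _ p => (· ++ [(p.1.2, p.2)])) PySem.Dict.empty (by simp)
  rw [PySem.Dict.items_eq_map_keys _ hnd [], hkeys]
  simp only [PySem.Dict.keys_empty, PySem.Set.update_nil_left]
  apply List.map_congr_left
  intro k hk
  congr 1
  have hfold : (a.foldl (fun d (p : (Int × Int) × Int) => d.modify p.1.1 [] (· ++ [(p.1.2, p.2)])) PySem.Dict.empty)
      = ((a.map (fun p => (p.1.1, (p.1.2, p.2)))).foldl (fun d q => d.modify q.1 [] (· ++ [q.2])) PySem.Dict.empty) := by
    rw [List.foldl_map]
  rw [hfold, PySem.Dict.getD_foldl_modify_append]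
  simp [List.filter_map, Function.comp_def, List.map_map]

-- B's grouping dict as an explicit items list
theorem itemsB (a : List ((Int × Int) × Int)) :
    (a.foldl (fun d (p : (Int × Int) × Int) => d.modify p.1.1 PySem.Set.empty (fun s => PySem.Set.add s p.1.2)) PySem.Dict.empty).items
      = (PySem.Set.ofList (a.map (fun p => p.1.1))).map
          (fun k => (k, PySem.Set.ofList ((a.filter (fun p => p.1.1 == k)).map (fun p => p.1.2)))) := by
  have hkeys := PySem.Dict.keys_foldl_modify_key a (fun p => p.1.1) (PySem.Set.empty : PySem.Set Int)
      (fun _ p => (fun s => PySem.Set.add s p.1.2)) PySem.Dict.empty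
  have hnd := PySem.Dict.nodup_keys_foldl_modify_key a (fun p => p.1.1) (PySem.Set.empty : PySem.Set Int)
      (fun _ p => (fun s => PySem.Set.add s p.1.2)) PySem.Dict.empty (by simp)
  rw [PySem.Dict.items_eq_map_keys _ hnd PySem.Set.empty, hkeys]
  simp only [PySem.Dict.keys_empty, PySem.Set.update_nil_left]
  apply List.map_congr_left
  intro k hk
  congr 1
  rw [getD_foldl_modify_add]
  simp [PySem.Dict.getD_empty, PySem.Set.update_nil_left]

theorem pyConsolidate_eq_self (xs : List ((Int × Int) × Int))
    (h1 : (xs.map (·.1)).Nodup) (h2 : ∀ p ∈ xs, p.2 ≠ 0) : pyConsolidate xs = xs := by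
  unfold pyConsolidate
  simp only []
  rw [consolidate_fresh xs PySem.Dict.empty (by simp) (by intro p _; simp) h1]
  have hemp : (PySem.Dict.empty : PySem.Dict (Int × Int) Int).items = [] := rfl
  rw [hemp, List.nil_append, List.filter_eq_self.mpr]
  intro p hp
  simpa using h2 p hp

theorem main_eq (a : List ((Int × Int) × Int)) :
    collection_distinct a = collection_distinct_alt a := by
  unfold collection_distinct pyReduce collection_distinct_alt
  simp only [itemsA, itemsB]
  rw [PySem.List.foldl_append_eq_flatMap, List.nil_append, List.flatMap_map, List.flatMap_map]
  have hbody : ∀ k : Int,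
      (pyDistinctVals ((a.filter (fun p => p.1.1 == k)).map (fun p => (p.1.2, p.2)))).map
          (fun vd => ((k, vd.1), vd.2))
        = (PySem.Set.ofList ((a.filter (fun p => p.1.1 == k)).map (fun p => p.1.2))).map
            (fun val => ((k, val), (1 : Int))) := by
    intro k
    unfold pyDistinctVals
    rw [← PySem.Set.update_map_eq_foldl_add]
    have hemp : (PySem.Set.empty : PySem.Set Int) = [] := rfl
    rw [hemp, PySem.Set.update_nil_left]
    simp [List.map_map, Function.comp_def]
  simp only [hbody]
  set K := PySem.Set.ofList (a.map (fun p => p.1.1)) with hK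
  set VS := fun k => PySem.Set.ofList ((a.filter (fun p => p.1.1 == k)).map (fun p => p.1.2)) with hVS
  rw [pyConsolidate_eq_self]
  · rw [List.map_flatMap]
    simp only [List.map_map, Function.comp_def]
    exact nodup_tagged K VS (PySem.Set.nodup_ofList _) (fun k => PySem.Set.nodup_ofList _)
  · intro p hp
    simp only [List.mem_flatMap, List.mem_map] at hp
    obtain ⟨k, _, v, _, rfl⟩ := hp
    simp

-- ===== VERDICT (by name: the statement is the Claim_ definition above) =====
theorem collection_distinct_spec : Claim_equal_collection_distinct := by
  intro a _ _
  exact main_eq a
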